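-- pv_equiv track=rewrite | github.com/gigagigohub/websoccer-player-search | scripts/link_challenge_history.py | _normalize_membership
-- ===== SOURCE A (Python) =====
-- from typing import Dict, List, Tuple
--
-- CATEGORY_ORDER = {'NR': 0, 'CC': 1, 'SS': 2, 'CM': 3, 'CM/SS': 4, 'NA': 5, 'RT': 6}
--
-- def _normalize_membership(membership, category: str) -> List[str]:
--     out = []
--     if isinstance(membership, list):
--         out.extend(str(x) for x in membership if x)
--     if category and category not in out:
--         out.append(category)
--     unique = []
--     seen = set()
--     for x in out:
--         if x in seen:
--             continue
--         seen.add(x)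
--         unique.append(x)
--     unique.sort(key=lambda c: CATEGORY_ORDER.get(c, 999))
--     return unique
-- ===== SOURCE B (Python) =====
-- CATEGORY_ORDER = {'NR': 0, 'CC': 1, 'SS': 2, 'CM': 3, 'CM/SS': 4, 'NA': 5, 'RT': 6}
--
-- def _normalize_membership(membership, category):
--     # collect the raw entries; appending category unconditionally is fine,
--     # since deduplication keeps the first occurrence anyway
--     raw = [str(x) for x in membership if x] if isinstance(membership, list) else []
--     if category:
--         raw.append(category)
--     # No sort and no dedup-then-sort needed: the known categories have distinct
--     # sort keys 0..6, so they come out in CATEGORY_ORDER key order; the unknown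
--     # entries all tie at key 999, so a stable sort keeps them in first-occurrence
--     # order after the known ones.
--     known = [c for c in CATEGORY_ORDER if c in raw]
--     unknown = [x for x in dict.fromkeys(raw) if x not in CATEGORY_ORDER]
--     return known + unknown
-- ===== Notes on version B (the rewrite author's own statement) =====
-- stated objective: idiomatic
-- what changed: Drops the hash-set dedup loop and the sort entirely: since the seven known categories have distinct sort keys 0..6 and all unknown entries tie at key 999, B emits the known categories by scanning CATEGORY_ORDER's keys in order and testing membership, then appends the unknown entries in first-occurrence order via dict.fromkeys, and appends the extra category unconditionally because first-occurrence dedup makes A's 'not in' guard redundant.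
import Mathlib
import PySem

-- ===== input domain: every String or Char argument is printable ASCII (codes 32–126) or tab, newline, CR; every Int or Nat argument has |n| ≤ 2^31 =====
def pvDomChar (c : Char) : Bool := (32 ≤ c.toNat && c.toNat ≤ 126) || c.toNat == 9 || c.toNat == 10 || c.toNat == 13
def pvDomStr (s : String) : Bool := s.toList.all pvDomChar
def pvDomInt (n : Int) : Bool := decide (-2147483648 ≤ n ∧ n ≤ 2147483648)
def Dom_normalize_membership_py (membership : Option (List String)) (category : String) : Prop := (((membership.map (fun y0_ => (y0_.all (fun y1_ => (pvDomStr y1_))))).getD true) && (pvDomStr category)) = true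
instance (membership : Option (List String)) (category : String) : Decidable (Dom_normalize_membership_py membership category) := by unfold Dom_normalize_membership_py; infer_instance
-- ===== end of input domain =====

-- B drops A's hash-set dedup loop and the sort altogether: known categories are emitted
-- by scanning CATEGORY_ORDER's keys in order, unknown entries follow in first-occurrence
-- order via dict.fromkeys (idiomatic rewrite; same return value, similar cost).

-- ===== PORT A =====
def pvCatOrder : PySem.Dict String Int :=
  PySem.Dict.ofList [("NR", 0), ("CC", 1), ("SS", 2), ("CM", 3), ("CM/SS", 4), ("NA", 5), ("RT", 6)]

-- the sort key lambda: CATEGORY_ORDER.get(c, 999)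
def pvKey (c : String) : Int := PySem.Dict.getD pvCatOrder c 999

def normalize_membership_py (membership : Option (List String)) (category : String) : List String :=
  -- out = []; if isinstance(membership, list): out.extend(str(x) for x in membership if x)
  let out : List String := match membership with
    | some l => l.filter (fun x => x.toList ≠ [])   -- str(x) = x on strings; 'if x' = nonempty
    | none => []
  -- if category and category not in out: out.append(category)
  let out := if category.toList ≠ [] ∧ category ∉ out then out ++ [category] else out
  -- unique = []; seen = set(); for x in out: …
  let st := out.foldl
    (fun (st : PySem.Set String × List String) x =>
      if PySem.Set.contains st.1 x then st
      else (PySem.Set.add st.1 x, st.2 ++ [x]))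
    (PySem.Set.empty, [])
  -- unique.sort(key=lambda c: CATEGORY_ORDER.get(c, 999))
  PySem.List.sorted st.2 pvKey

-- ===== PORT B =====
-- CATEGORY_ORDER's keys in dict (insertion) order; 'x in CATEGORY_ORDER' = x ∈ pvKeysB
def pvKeysB : List String := ["NR", "CC", "SS", "CM", "CM/SS", "NA", "RT"]

def normalize_membership_py_alt (membership : Option (List String)) (category : String) : List String :=
  -- raw = [str(x) for x in membership if x] if isinstance(membership, list) else []
  let raw := (membership.getD []).filter (fun x => x.toList ≠ [])
  -- if category: raw.append(category)
  let raw := if category.toList ≠ [] then raw ++ [category] else raw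
  -- known = [c for c in CATEGORY_ORDER if c in raw]
  let known := pvKeysB.filter (fun c => c ∈ raw)
  -- unknown = [x for x in dict.fromkeys(raw) if x not in CATEGORY_ORDER]
  let unknown := (PySem.List.dedup raw).filter (fun x => x ∉ pvKeysB)
  known ++ unknown

-- ===== PRECONDITION & SPEC =====
def Spec_normalize_membership_py (membership : Option (List String)) (category : String) (out : List String) : Prop := out = normalize_membership_py_alt membership category
instance (membership : Option (List String)) (category : String) (out : List String) : Decidable (Spec_normalize_membership_py membership category out) := by unfold Spec_normalize_membership_py; infer_instance

-- ===== CLAIM (what is proved, stated in full; the proofs are below) =====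
def Claim_equal_normalize_membership_py : Prop := ∀ (membership : Option (List String)) (category : String), Dom_normalize_membership_py membership category → Spec_normalize_membership_py membership category (normalize_membership_py membership category)

-- ===== LEMMAS AND PROOFS =====

-- bucket index of the stable sort: CATEGORY_ORDER.get(x, 999) collapsed to levels 0..7
def pvBucketIdx (x : String) : Nat := if pvKey x = 999 then 7 else (pvKey x).toNat

def pvLevel (i : Nat) : Int := if i = 7 then 999 else (i : Int)

def pvBucketsOf (u : List String) : List (List String) :=
  (List.range 8).map (fun i => u.filter (fun x => pvBucketIdx x = i))

lemma pvCatOrder_eq : pvCatOrder = PySem.Dict.mk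
    [("NR", 0), ("CC", 1), ("SS", 2), ("CM", 3), ("CM/SS", 4), ("NA", 5), ("RT", 6)] := by
  decide

lemma pvKey_eq_level (x : String) : pvKey x = pvLevel (pvBucketIdx x) := by
  unfold pvBucketIdx pvKey
  rw [pvCatOrder_eq]
  simp only [PySem.Dict.getD, PySem.Dict.get?_mk_cons]
  split_ifs <;> simp_all [pvLevel, PySem.Dict.get?]

lemma pvBucketIdx_lt (x : String) : pvBucketIdx x < 8 := by
  unfold pvBucketIdx pvKey
  rw [pvCatOrder_eq]
  simp only [PySem.Dict.getD, PySem.Dict.get?_mk_cons]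
  split_ifs <;> simp_all [PySem.Dict.get?]

lemma pvLevel_mono {i j : Nat} (hij : i < j) (hj : j < 8) : pvLevel i < pvLevel j := by
  unfold pvLevel
  split_ifs <;> omega

lemma pvInsertBy_append_left {α : Type} (before : α → α → Bool) (x : α) (L R : List α)
    (h : ∀ y ∈ L, before x y = false) :
    PySem.List.insertBy before x (L ++ R) = L ++ PySem.List.insertBy before x R := by
  induction L with
  | nil => rfl
  | cons y t ih =>
      simp [PySem.List.insertBy, h y (by simp), ih (fun z hz => h z (by simp [hz]))]

lemma pvInsertBy_all_before {α : Type} (before : α → α → Bool) (x : α) (R : List α)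
    (h : ∀ y ∈ R, before x y = true) :
    PySem.List.insertBy before x R = x :: R := by
  cases R with
  | nil => rfl
  | cons y t => simp [PySem.List.insertBy, h y (by simp)]

lemma pvInsert_levels (is : List Nat) (hs : is.Pairwise (· < ·)) (x : String)
    (hmem : pvBucketIdx x ∈ is) (u : List String) :
    PySem.List.insertBy (fun a b => decide (pvKey a < pvKey b)) x
        ((is.map (fun i => u.filter (fun y => pvBucketIdx y = i))).flatten)
      = (is.map (fun i => (u ++ [x]).filter (fun y => pvBucketIdx y = i))).flatten := by
  induction is with
  | nil => simp at hmem
  | cons i tl ih =>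
      have hpt : tl.Pairwise (· < ·) := hs.of_cons
      have hlt : ∀ j ∈ tl, i < j := fun j hj => List.rel_of_pairwise_cons hs hj
      simp only [List.map_cons, List.flatten_cons]
      by_cases hx : pvBucketIdx x = i
      · have hL : ∀ y ∈ u.filter (fun y => pvBucketIdx y = i),
            (fun a b => decide (pvKey a < pvKey b)) x y = false := by
          intro y hy
          have hyi : pvBucketIdx y = i := by simpa using List.of_mem_filter hy
          simp [pvKey_eq_level, hyi, hx]
        have hR : ∀ y ∈ (tl.map (fun j => u.filter (fun y => pvBucketIdx y = j))).flatten,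
            (fun a b => decide (pvKey a < pvKey b)) x y = true := by
          intro y hy
          obtain ⟨Lj, hLj, hyL⟩ := List.mem_flatten.1 hy
          obtain ⟨j, hj, rfl⟩ := List.mem_map.1 hLj
          have hyj : pvBucketIdx y = j := by simpa using List.of_mem_filter hyL
          have hij : i < j := hlt j hj
          simp only [pvKey_eq_level, hx, hyj, decide_eq_true_eq]
          exact pvLevel_mono hij (hyj ▸ pvBucketIdx_lt y)
        rw [pvInsertBy_append_left _ _ _ _ hL, pvInsertBy_all_before _ _ _ hR]
        have h1 : (u ++ [x]).filter (fun y => decide (pvBucketIdx y = i))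
            = u.filter (fun y => decide (pvBucketIdx y = i)) ++ [x] := by
          simp [List.filter_append, hx]
        have h2 : tl.map (fun j => (u ++ [x]).filter (fun y => decide (pvBucketIdx y = j)))
            = tl.map (fun j => u.filter (fun y => decide (pvBucketIdx y = j))) :=
          List.map_congr_left fun j hj => by
            have : pvBucketIdx x ≠ j := by have := hlt j hj; omega
            simp [List.filter_append, this]
        rw [h1, h2]
        simp
      · have hmem' : pvBucketIdx x ∈ tl := by
          rcases List.mem_cons.1 hmem with h | h
          · exact absurd h hx
          · exact h
        have hL : ∀ y ∈ u.filter (fun y => pvBucketIdx y = i),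
            (fun a b => decide (pvKey a < pvKey b)) x y = false := by
          intro y hy
          have hyi : pvBucketIdx y = i := by simpa using List.of_mem_filter hy
          have hix : i < pvBucketIdx x := hlt _ hmem'
          simp only [pvKey_eq_level, hyi, decide_eq_false_iff_not, not_lt]
          exact le_of_lt (pvLevel_mono hix (pvBucketIdx_lt x))
        rw [pvInsertBy_append_left _ _ _ _ hL, ih hpt hmem']
        have h1 : (u ++ [x]).filter (fun y => decide (pvBucketIdx y = i))
            = u.filter (fun y => decide (pvBucketIdx y = i)) := by
          simp [List.filter_append, hx]
        rw [h1]

lemma pvSorted_eq_buckets (u : List String) :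
    PySem.List.sorted u pvKey = (pvBucketsOf u).flatten := by
  induction u using List.reverseRecOn with
  | nil => rfl
  | append_singleton u x ih =>
      rw [PySem.List.sorted_eq_foldl_insertBy, List.foldl_append, List.foldl_cons, List.foldl_nil,
        ← PySem.List.sorted_eq_foldl_insertBy, ih]
      unfold pvBucketsOf
      exact pvInsert_levels (List.range 8) List.pairwise_lt_range x
        (List.mem_range.2 (pvBucketIdx_lt x)) u

-- A's dedup loop is Set.ofList (both components)
lemma pvAFold (l : List String) (s : PySem.Set String) :
    l.foldl (fun (st : PySem.Set String × List String) x =>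
        if PySem.Set.contains st.1 x then st
        else (PySem.Set.add st.1 x, st.2 ++ [x])) (s, s)
      = (l.foldl PySem.Set.add s, l.foldl PySem.Set.add s) := by
  induction l generalizing s with
  | nil => rfl
  | cons x t ih =>
      simp only [List.foldl_cons]
      by_cases hc : x ∈ s
      · have h1 : PySem.Set.contains s x = true := by simpa using hc
        have h2 : PySem.Set.add s x = s := by simp [PySem.Set.add, hc]
        rw [if_pos h1, h2]
        exact ih s
      · have h1 : PySem.Set.contains s x = false := by simpa using hc
        have h2 : PySem.Set.add s x = s ++ [x] := by simp [PySem.Set.add, hc]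
        rw [if_neg (by simp [hc]), h2]
        exact ih (s ++ [x])

-- unconditional vs guarded append of category: same set
lemma pvOfList_out_raw (base : List String) (category : String) :
    PySem.Set.ofList (if category.toList ≠ [] ∧ category ∉ base then base ++ [category] else base)
      = PySem.Set.ofList (if category.toList ≠ [] then base ++ [category] else base) := by
  by_cases hc : category.toList = []
  · simp [hc]
  · by_cases hm : category ∈ base
    · have : PySem.Set.ofList (base ++ [category]) = PySem.Set.ofList base := by
        rw [PySem.Set.ofList_eq_foldl, List.foldl_append]
        simp only [List.foldl_cons, List.foldl_nil, ← PySem.Set.ofList_eq_foldl]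
        simp [PySem.Set.add, (PySem.Set.mem_ofList base category).2 hm]
      simp [hc, hm, this]
    · simp [hc, hm]

-- level 0..6 ↔ the corresponding key string; level 7 ↔ unknown
set_option maxHeartbeats 1000000 in
lemma pvIdx_eq (x : String) : pvBucketIdx x =
    if "NR" = x then 0 else if "CC" = x then 1 else if "SS" = x then 2
    else if "CM" = x then 3 else if "CM/SS" = x then 4 else if "NA" = x then 5
    else if "RT" = x then 6 else 7 := by
  unfold pvBucketIdx pvKey
  rw [pvCatOrder_eq]
  simp only [PySem.Dict.getD, PySem.Dict.get?_mk_cons]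
  split_ifs <;> simp_all [PySem.Dict.get?]

set_option maxHeartbeats 1000000 in
lemma pvIdx_char (x : String) :
    (pvBucketIdx x = 0 ↔ x = "NR") ∧ (pvBucketIdx x = 1 ↔ x = "CC") ∧
    (pvBucketIdx x = 2 ↔ x = "SS") ∧ (pvBucketIdx x = 3 ↔ x = "CM") ∧
    (pvBucketIdx x = 4 ↔ x = "CM/SS") ∧ (pvBucketIdx x = 5 ↔ x = "NA") ∧
    (pvBucketIdx x = 6 ↔ x = "RT") ∧ (pvBucketIdx x = 7 ↔ x ∉ pvKeysB) := by
  rw [pvIdx_eq]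
  split_ifs <;> first
    | (subst_vars; decide)
    | (refine ⟨?_, ?_, ?_, ?_, ?_, ?_, ?_, ?_⟩ <;> simp_all [pvKeysB, eq_comm])

-- filtering a Nodup list for one fixed element
lemma pvFilter_single (u : List String) (hu : u.Nodup) (c : String) :
    u.filter (fun x => decide (x = c)) = if c ∈ u then [c] else [] := by
  induction u with
  | nil => simp
  | cons y t ih =>
      have hn : t.Nodup := hu.of_cons
      by_cases hy : y = c
      · subst hy
        have hnt : y ∉ t := (List.nodup_cons.1 hu).1
        have hz : t.filter (fun x => decide (x = y)) = [] :=
          List.filter_eq_nil_iff.2 (fun a ha => by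
            simp only [decide_eq_true_eq]
            rintro rfl
            exact hnt ha)
        simp [hz]
      · simp [hy, ih hn, Ne.symm hy]

-- the flattened buckets of a Nodup list are: known keys in order, then the unknowns
lemma pvFilter_flat (ks v : List String) :
    ks.filter (fun c => decide (c ∈ v)) = (ks.map (fun c => if c ∈ v then [c] else [])).flatten := by
  induction ks with
  | nil => rfl
  | cons k t ih => by_cases h : k ∈ v <;> simp [h, ih]

set_option maxHeartbeats 1000000 in
lemma pvBuckets_known_unknown (u : List String) (hu : u.Nodup) :
    (pvBucketsOf u).flatten
      = pvKeysB.filter (fun c => c ∈ u) ++ u.filter (fun x => decide (x ∉ pvKeysB)) := by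
  have h8 : List.range 8 = [0, 1, 2, 3, 4, 5, 6, 7] := by decide
  unfold pvBucketsOf
  rw [h8]
  simp only [List.map_cons, List.map_nil, List.flatten_cons, List.flatten_nil, List.append_nil]
  have e0 : u.filter (fun x => decide (pvBucketIdx x = 0))
      = u.filter (fun x => decide (x = "NR")) :=
    List.filter_congr (fun x _ => by simp [(pvIdx_char x).1])
  have f0 : u.filter (fun x => decide (pvBucketIdx x = 0)) = if "NR" ∈ u then ["NR"] else [] := by
    rw [e0, pvFilter_single u hu]
  have e1 : u.filter (fun x => decide (pvBucketIdx x = 1))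
      = u.filter (fun x => decide (x = "CC")) :=
    List.filter_congr (fun x _ => by simp [(pvIdx_char x).2.1])
  have f1 : u.filter (fun x => decide (pvBucketIdx x = 1)) = if "CC" ∈ u then ["CC"] else [] := by
    rw [e1, pvFilter_single u hu]
  have e2 : u.filter (fun x => decide (pvBucketIdx x = 2))
      = u.filter (fun x => decide (x = "SS")) :=
    List.filter_congr (fun x _ => by simp [(pvIdx_char x).2.2.1])
  have f2 : u.filter (fun x => decide (pvBucketIdx x = 2)) = if "SS" ∈ u then ["SS"] else [] := by
    rw [e2, pvFilter_single u hu]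
  have e3 : u.filter (fun x => decide (pvBucketIdx x = 3))
      = u.filter (fun x => decide (x = "CM")) :=
    List.filter_congr (fun x _ => by simp [(pvIdx_char x).2.2.2.1])
  have f3 : u.filter (fun x => decide (pvBucketIdx x = 3)) = if "CM" ∈ u then ["CM"] else [] := by
    rw [e3, pvFilter_single u hu]
  have e4 : u.filter (fun x => decide (pvBucketIdx x = 4))
      = u.filter (fun x => decide (x = "CM/SS")) :=
    List.filter_congr (fun x _ => by simp [(pvIdx_char x).2.2.2.2.1])
  have f4 : u.filter (fun x => decide (pvBucketIdx x = 4)) = if "CM/SS" ∈ u then ["CM/SS"] else [] := by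
    rw [e4, pvFilter_single u hu]
  have e5 : u.filter (fun x => decide (pvBucketIdx x = 5))
      = u.filter (fun x => decide (x = "NA")) :=
    List.filter_congr (fun x _ => by simp [(pvIdx_char x).2.2.2.2.2.1])
  have f5 : u.filter (fun x => decide (pvBucketIdx x = 5)) = if "NA" ∈ u then ["NA"] else [] := by
    rw [e5, pvFilter_single u hu]
  have e6 : u.filter (fun x => decide (pvBucketIdx x = 6))
      = u.filter (fun x => decide (x = "RT")) :=
    List.filter_congr (fun x _ => by simp [(pvIdx_char x).2.2.2.2.2.2.1])
  have f6 : u.filter (fun x => decide (pvBucketIdx x = 6)) = if "RT" ∈ u then ["RT"] else [] := by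
    rw [e6, pvFilter_single u hu]
  have f7 : u.filter (fun x => decide (pvBucketIdx x = 7))
      = u.filter (fun x => decide (x ∉ pvKeysB)) :=
    List.filter_congr (fun x _ => by simp [(pvIdx_char x).2.2.2.2.2.2.2])
  rw [f0, f1, f2, f3, f4, f5, f6, f7, pvFilter_flat]
  simp only [pvKeysB, List.map_cons, List.map_nil, List.flatten_cons, List.flatten_nil,
    List.append_nil, List.append_assoc]

lemma pvEq (base : List String) (category : String) :
    PySem.List.sorted
      ((if category.toList ≠ [] ∧ category ∉ base then base ++ [category] else base).foldl
        (fun (st : PySem.Set String × List String) x =>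
          if PySem.Set.contains st.1 x then st
          else (PySem.Set.add st.1 x, st.2 ++ [x])) (PySem.Set.empty, [])).2 pvKey
    = pvKeysB.filter (fun c => c ∈ (if category.toList ≠ [] then base ++ [category] else base))
      ++ (PySem.List.dedup (if category.toList ≠ [] then base ++ [category] else base)).filter
          (fun x => x ∉ pvKeysB) := by
  set out := if category.toList ≠ [] ∧ category ∉ base then base ++ [category] else base with hout
  set raw := if category.toList ≠ [] then base ++ [category] else base with hraw
  have hset : PySem.Set.ofList out = PySem.Set.ofList raw := pvOfList_out_raw base category
  have hA : (out.foldl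
      (fun (st : PySem.Set String × List String) x =>
        if PySem.Set.contains st.1 x then st
        else (PySem.Set.add st.1 x, st.2 ++ [x])) (PySem.Set.empty, [])).2
      = PySem.Set.ofList out := by
    rw [show ((PySem.Set.empty : PySem.Set String), ([] : List String))
        = ((PySem.Set.empty : PySem.Set String), (PySem.Set.empty : PySem.Set String)) from rfl,
      pvAFold out PySem.Set.empty]
    rw [PySem.Set.ofList_eq_foldl]
    rfl
  have hB : (PySem.List.dedup raw).filter (fun x => x ∉ pvKeysB)
      = (PySem.Set.ofList raw).filter (fun x => decide (x ∉ pvKeysB)) := by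
    rw [PySem.List.dedup_eq_ofList]
  have hknown : pvKeysB.filter (fun c => c ∈ raw)
      = pvKeysB.filter (fun c => decide (c ∈ PySem.Set.ofList raw)) :=
    List.filter_congr (fun c _ => by simp [PySem.Set.mem_ofList])
  rw [hA, hset, hB, hknown, pvSorted_eq_buckets,
    pvBuckets_known_unknown _ (PySem.Set.nodup_ofList raw)]

-- ===== VERDICT (by name: the statement is the Claim_ definition above) =====
theorem normalize_membership_py_spec : Claim_equal_normalize_membership_py := by
  intro membership category _
  unfold Spec_normalize_membership_py normalize_membership_py normalize_membership_py_alt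
  cases membership with
  | none => exact pvEq [] category
  | some l => exact pvEq (l.filter fun x => x.toList ≠ []) category
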